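-- pv_equiv track=rewrite | github.com/xelestial/project-mrn | engine/config.py | _compute_block_ids_cache
-- ===== SOURCE A (Python) =====
-- from enum import IntEnum
-- from typing import Dict, Iterable, List, Optional, Tuple
--
-- class CellKind(IntEnum):
--     F1 = 1
--     F2 = 2
--     S = 3
--     T2 = 4
--     T3 = 5
--     MALICIOUS = 6
--
-- def _compute_block_ids_cache(board: Tuple[CellKind, ...]) -> Tuple[int, ...]:
--     block_ids: List[int] = [-1] * len(board)
--     current = 0
--     in_run = False
--     for i, cell in enumerate(board):
--         if cell in (CellKind.T2, CellKind.T3):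
--             if not in_run:
--                 in_run = True
--                 current += 1
--             block_ids[i] = current
--         else:
--             in_run = False
--     return tuple(block_ids)
-- ===== SOURCE B (Python) =====
-- # Block-run labelling by scanning whole runs at once (two-pointer span scan)
-- # and emitting each block as a slice, instead of A's per-cell state machine.
-- # Cell kinds T2/T3 are the integer values 4 and 5 (CellKind is an IntEnum).
-- def _compute_block_ids_cache(board):
--     out = []
--     i, n, run = 0, len(board), 0
--     while i < n:
--         if board[i] in (4, 5):
--             j = i + 1
--             while j < n and board[j] in (4, 5):
--                 j += 1
--             run += 1
--             out.extend([run] * (j - i))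
--             i = j
--         else:
--             out.append(-1)
--             i += 1
--     return tuple(out)
-- ===== Notes on version B (the rewrite author's own statement) =====
-- stated objective: faster
-- what changed: Replaced A's per-cell state machine (in_run flag, write at each index into a preallocated -1 list) with a two-pointer span scan that finds each whole T2/T3 run at once and emits it as a single block via list.extend, appending output forward.
import Mathlib
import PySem

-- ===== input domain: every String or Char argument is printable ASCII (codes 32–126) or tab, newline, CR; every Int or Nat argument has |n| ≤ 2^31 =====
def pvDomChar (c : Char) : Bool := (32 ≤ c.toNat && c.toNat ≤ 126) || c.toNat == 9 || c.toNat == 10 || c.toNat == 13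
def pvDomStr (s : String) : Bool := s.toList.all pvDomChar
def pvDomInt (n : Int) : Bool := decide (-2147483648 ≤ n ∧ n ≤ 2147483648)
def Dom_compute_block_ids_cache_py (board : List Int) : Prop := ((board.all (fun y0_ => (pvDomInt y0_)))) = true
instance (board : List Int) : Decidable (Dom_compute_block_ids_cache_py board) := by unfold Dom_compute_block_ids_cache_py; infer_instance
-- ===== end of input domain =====

-- B labels the runs of T2/T3 cells (values 4/5) by scanning each whole run at once
-- (span scan, block emitted as one slice) instead of A's per-cell in_run state machine;
-- objective: different decomposition (a timing run measured B faster by a constant factor).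

-- ===== PORT A =====
-- Literal port of A: block_ids initialised to -1s, a fold over enumerate(board)
-- carrying (block_ids, current, in_run), writing block_ids[i] by set.
def compute_block_ids_cache_py (board : List Int) : List Int :=
  ((PySem.List.enumerate board).foldl
    (fun (st : List Int × Int × Bool) (ic : Int × Int) =>
      if ic.2 = 4 ∨ ic.2 = 5 then
        let cur : Int := if !st.2.2 then st.2.1 + 1 else st.2.1
        (st.1.set ic.1.toNat cur, cur, true)
      else (st.1, st.2.1, false))
    (List.replicate board.length (-1), 0, false)).1

-- ===== PORT B =====
-- Port of B: outer scan; on a block cell, take the whole run, emit it at once,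
-- continue after the run with an incremented run counter.
def pvAltGo (l : List Int) (run : Int) : List Int :=
  match l with
  | [] => []
  | c :: rest =>
    if c = 4 ∨ c = 5 then
      let block := rest.takeWhile (fun x => decide (x = 4 ∨ x = 5))
      List.replicate (block.length + 1) (run + 1) ++ pvAltGo (rest.drop block.length) (run + 1)
    else (-1) :: pvAltGo rest run
termination_by l.length
decreasing_by
  all_goals simp only [List.length_drop, List.length_cons]
  all_goals omega

def compute_block_ids_cache_py_alt (board : List Int) : List Int := pvAltGo board 0

-- ===== PRECONDITION & SPEC =====
def Spec_compute_block_ids_cache_py (board : List Int) (out : List Int) : Prop := out = compute_block_ids_cache_py_alt board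
instance (board : List Int) (out : List Int) : Decidable (Spec_compute_block_ids_cache_py board out) := by unfold Spec_compute_block_ids_cache_py; infer_instance

-- ===== CLAIM (what is proved, stated in full; the proofs are below) =====
def Claim_equal_compute_block_ids_cache_py : Prop := ∀ (board : List Int), Dom_compute_block_ids_cache_py board → Spec_compute_block_ids_cache_py board (compute_block_ids_cache_py board)

-- ===== LEMMAS AND PROOFS =====

-- Functional restatement of A's state machine, emitting the list directly.
def pvSpecA : List Int → Int → Bool → List Int
  | [], _, _ => []
  | c :: r, cur, inr =>
    if c = 4 ∨ c = 5 then
      let cur' : Int := if !inr then cur + 1 else cur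
      cur' :: pvSpecA r cur' true
    else (-1) :: pvSpecA r cur false

lemma pvFoldA (l pre : List Int) (cur : Int) (inr : Bool) :
    ((PySem.List.enumerate l (pre.length : Int)).foldl
      (fun (st : List Int × Int × Bool) (ic : Int × Int) =>
        if ic.2 = 4 ∨ ic.2 = 5 then
          let c : Int := if !st.2.2 then st.2.1 + 1 else st.2.1
          (st.1.set ic.1.toNat c, c, true)
        else (st.1, st.2.1, false))
      (pre ++ List.replicate l.length (-1), cur, inr)).1
    = pre ++ pvSpecA l cur inr := by
  induction l generalizing pre cur inr with
  | nil => simp [PySem.List.enumerate, pvSpecA]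
  | cons c r ih =>
    rw [PySem.List.enumerate_cons, List.foldl_cons]
    by_cases h : c = 4 ∨ c = 5
    · simp only [if_pos h, List.length_cons]
      have hset : (pre ++ List.replicate (r.length + 1) (-1 : Int)).set
          ((pre.length : Int)).toNat (if !inr then cur + 1 else cur)
          = (pre ++ [if !inr then cur + 1 else cur]) ++ List.replicate r.length (-1) := by
        rw [List.replicate_succ, Int.toNat_natCast,
          List.set_append_right _ _ (Nat.le_refl _)]
        simp
      rw [hset]
      have h1 : ((pre.length : Int) + 1)
          = (((pre ++ [if !inr then cur + 1 else cur]).length : Nat) : Int) := by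
        simp
      rw [h1, ih (pre ++ [if !inr then cur + 1 else cur]) (if !inr then cur + 1 else cur) true]
      simp [pvSpecA, h]
    · simp only [if_neg h, List.length_cons]
      have hrep : pre ++ List.replicate (r.length + 1) (-1 : Int)
          = (pre ++ [(-1 : Int)]) ++ List.replicate r.length (-1) := by
        simp [List.replicate_succ]
      have h1 : ((pre.length : Int) + 1) = (((pre ++ [(-1 : Int)]).length : Nat) : Int) := by
        simp
      rw [hrep, h1, ih (pre ++ [(-1 : Int)]) cur false]
      simp [pvSpecA, h]

lemma pvA_eq_specA (board : List Int) :
    compute_block_ids_cache_py board = pvSpecA board 0 false := by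
  have := pvFoldA board [] 0 false
  simpa [compute_block_ids_cache_py] using this

-- after dropWhile, the head (if any) fails the predicate
lemma pvDropWhile_head (p : Int → Bool) (l : List Int) :
    ∀ x xs, l.dropWhile p = x :: xs → p x = false := by
  induction l with
  | nil => intro x xs h; simp [List.dropWhile] at h
  | cons a t ih =>
    intro x xs h
    by_cases hp : p a
    · rw [List.dropWhile_cons_of_pos hp] at h; exact ih x xs h
    · rw [List.dropWhile_cons_of_neg hp] at h
      cases h; simpa using hp

lemma pvSpecA_true_false (l : List Int) (cur : Int)
    (h : ∀ x xs, l = x :: xs → ¬ (x = 4 ∨ x = 5)) :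
    pvSpecA l cur true = pvSpecA l cur false := by
  cases l with
  | nil => rfl
  | cons x xs =>
    have := h x xs rfl
    simp [pvSpecA, this]

lemma pvSpecA_block (block rest : List Int) (cur : Int)
    (hb : ∀ x ∈ block, x = 4 ∨ x = 5) :
    pvSpecA (block ++ rest) cur true
      = List.replicate block.length cur ++ pvSpecA rest cur true := by
  induction block with
  | nil => simp
  | cons b t ih =>
    have hbb := hb b (by simp)
    simp only [List.cons_append, pvSpecA, hbb, if_pos, List.length_cons,
      List.replicate_succ, Bool.not_true]
    simp [ih (fun x hx => hb x (by simp [hx]))]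

lemma pvSpecA_eq_altGo (l : List Int) (cur : Int) :
    pvSpecA l cur false = pvAltGo l cur := by
  induction hn : l.length using Nat.strong_induction_on generalizing l cur with
  | _ n ih =>
  cases l with
  | nil => simp [pvSpecA, pvAltGo]
  | cons c rest =>
    by_cases h : c = 4 ∨ c = 5
    · set p : Int → Bool := fun x => decide (x = 4 ∨ x = 5) with hp
      have hsplit : rest.takeWhile p ++ rest.dropWhile p = rest :=
        List.takeWhile_append_dropWhile
      have hdrop := @List.drop_left Int (rest.takeWhile p) (rest.dropWhile p)
      rw [hsplit] at hdrop
      have hblock : ∀ x ∈ rest.takeWhile p, x = 4 ∨ x = 5 := by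
        intro x hx
        have := List.mem_takeWhile_imp hx
        simpa [hp] using this
      have htf : pvSpecA (rest.dropWhile p) (cur + 1) true
          = pvSpecA (rest.dropWhile p) (cur + 1) false := by
        apply pvSpecA_true_false
        intro x xs hx hcond
        have hfalse := pvDropWhile_head p _ x xs hx
        rw [hp] at hfalse
        simp at hfalse
        tauto
      have hlen : (rest.dropWhile p).length < n := by
        subst hn
        have := List.length_dropWhile_le p rest
        simp only [List.length_cons]
        omega
      calc pvSpecA (c :: rest) cur false
          = (cur + 1) :: pvSpecA rest (cur + 1) true := by
            simp [pvSpecA, h]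
        _ = (cur + 1) :: (List.replicate (rest.takeWhile p).length (cur + 1)
              ++ pvSpecA (rest.dropWhile p) (cur + 1) true) := by
            conv_lhs => rw [← hsplit]
            rw [pvSpecA_block _ _ _ hblock]
        _ = List.replicate ((rest.takeWhile p).length + 1) (cur + 1)
              ++ pvAltGo (rest.dropWhile p) (cur + 1) := by
            rw [htf, ih _ hlen _ _ rfl]
            simp [List.replicate_succ]
        _ = pvAltGo (c :: rest) cur := by
            rw [pvAltGo]
            simp only [if_pos h, ← hp, hdrop]
    · have hlen : rest.length < n := by subst hn; simp
      rw [pvAltGo]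
      simp only [pvSpecA, if_neg h]
      rw [ih _ hlen _ _ rfl]

-- ===== VERDICT (by name: the statement is the Claim_ definition above) =====
theorem compute_block_ids_cache_py_spec : Claim_equal_compute_block_ids_cache_py := by
  intro board _
  show compute_block_ids_cache_py board = compute_block_ids_cache_py_alt board
  rw [pvA_eq_specA, compute_block_ids_cache_py_alt, pvSpecA_eq_altGo]
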